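-- pv_equiv track=rewrite | github.com/danigomezdev/bombsquad | LessFinder/LessFinder.py | _format_accounts
-- ===== SOURCE A (Python) =====
-- def _format_accounts(accounts: list[str]) -> str:
--     """
--         Format the account list with a maximum of 5
--         accounts and line breaks every 3 accounts.
--     """
--     if not accounts:
--         return "No accounts"
--
--     # Limit to a maximum of 5 accounts
--     display_accounts = accounts[:5]
--     has_more = len(accounts) > 5
--
--     formatted = []
--     for i, account in enumerate(display_accounts, 1):
--         formatted.append(account)
--         if i % 3 == 0 and i < len(display_accounts):
--             formatted.append("\n")
--         elif i < len(display_accounts):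
--             formatted.append(", ")
--
--     # Add "..." if there are more accounts
--     if has_more:
--         if len(display_accounts) % 3 == 0:
--             formatted.append("\n...")
--         else:
--             formatted.append(", ...")
--
--     return "".join(formatted)
-- ===== SOURCE B (Python) =====
-- def _format_accounts(accounts: list[str]) -> str:
--     if not accounts:
--         return "No accounts"
--     display = accounts[:5]
--     rows = [", ".join(display[i:i+3]) for i in range(0, len(display), 3)]
--     result = "\n".join(rows)
--     if len(accounts) > 5:
--         result += ", ..."
--     return result
-- ===== Notes on version B (the rewrite author's own statement) =====
-- stated objective: simpler
-- what changed: B replaces A's per-element enumerate loop with modulo/position separator bookkeeping (and its dead '\n...' branch) by slicing the display list into rows of 3, joining each row with ', ' and the rows with '\n', then unconditionally appending ', ...' when more than 5 accounts exist.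
import Mathlib
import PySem

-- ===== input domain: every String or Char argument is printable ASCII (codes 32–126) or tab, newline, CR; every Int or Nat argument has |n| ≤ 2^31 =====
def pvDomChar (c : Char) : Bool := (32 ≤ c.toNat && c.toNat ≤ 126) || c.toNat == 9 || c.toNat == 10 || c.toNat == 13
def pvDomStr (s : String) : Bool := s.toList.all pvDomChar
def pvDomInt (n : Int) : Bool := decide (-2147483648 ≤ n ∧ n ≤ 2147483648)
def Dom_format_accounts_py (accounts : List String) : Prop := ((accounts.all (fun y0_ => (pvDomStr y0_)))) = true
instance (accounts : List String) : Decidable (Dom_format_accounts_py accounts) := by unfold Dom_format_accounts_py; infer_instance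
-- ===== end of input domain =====

-- B formats by grouping the (at most 5) displayed accounts into rows of 3 joined with ", " and joining rows with "\n"
-- (objective: simpler — shorter, no per-element separator bookkeeping); A's dead "\n..." branch is never needed since
-- more-than-5 input always leaves 5 displayed accounts, so B unconditionally appends ", ...".

-- ===== PORT A =====
def format_accounts_py (accounts : List String) : String :=
  if accounts = [] then "No accounts"
  else
    let display := PySem.List.slice accounts none (some 5)
    let hasMore := decide (PySem.List.len accounts > 5)
    let formatted := (PySem.List.enumerate display 1).foldl
      (fun acc (p : Int × String) =>
        let acc2 := acc ++ [p.2]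
        if PySem.Int.mod p.1 3 = 0 ∧ p.1 < PySem.List.len display then acc2 ++ ["\n"]
        else if p.1 < PySem.List.len display then acc2 ++ [", "]
        else acc2) []
    let formatted2 := if hasMore then
        (if PySem.Int.mod (PySem.List.len display) 3 = 0 then formatted ++ ["\n..."]
         else formatted ++ [", ..."])
      else formatted
    PySem.Str.join "" formatted2

-- ===== PORT B =====
def format_accounts_py_alt (accounts : List String) : String :=
  if accounts = [] then "No accounts"
  else
    let display := PySem.List.slice accounts none (some 5)
    let rows := (PySem.List.pyRange 0 (PySem.List.len display) 3).map
      (fun i => PySem.Str.join ", " (PySem.List.slice display (some i) (some (i + 3))))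
    let result := PySem.Str.join "\n" rows
    if decide (PySem.List.len accounts > 5) then result ++ ", ..." else result

-- ===== PRECONDITION & SPEC =====
def Spec_format_accounts_py (accounts : List String) (out : String) : Prop := out = format_accounts_py_alt accounts
instance (accounts : List String) (out : String) : Decidable (Spec_format_accounts_py accounts out) := by unfold Spec_format_accounts_py; infer_instance

-- ===== CLAIM (what is proved, stated in full; the proofs are below) =====
def Claim_equal_format_accounts_py : Prop := ∀ (accounts : List String), Dom_format_accounts_py accounts → Spec_format_accounts_py accounts (format_accounts_py accounts)

-- ===== LEMMAS AND PROOFS =====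

-- Only the first 5 elements and whether a 6th exists matter, so a 7-way case split on the
-- list's shape (0..5 elements, or ≥ 6) reduces each side to a concrete join of string variables.
theorem format_accounts_py_cases (accounts : List String) :
    format_accounts_py accounts = format_accounts_py_alt accounts := by
  rcases accounts with _ | ⟨a, _ | ⟨b, _ | ⟨c, _ | ⟨d, _ | ⟨e, _ | ⟨f, rest⟩⟩⟩⟩⟩⟩
  · rfl
  all_goals apply String.toList_inj.mp
  case cons.cons.cons.cons.cons.cons =>
    simp [format_accounts_py, format_accounts_py_alt, PySem.List.enumerate, PySem.List.slice,
      PySem.List.clampIdx, PySem.Int.mod, PySem.List.pyRange, PySem.List.len, List.intercalate,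
      PySem.Str.join, PySem.Chars.join, List.range_succ,
      show ((5:Int) < (rest.length:Int)+1+1+1+1+1+1) from by omega]
  all_goals
    simp [format_accounts_py, format_accounts_py_alt, PySem.List.enumerate, PySem.List.slice,
      PySem.List.clampIdx, PySem.Int.mod, PySem.List.pyRange, PySem.List.len, List.intercalate,
      PySem.Str.join, PySem.Chars.join, List.range_succ]

-- ===== VERDICT (by name: the statement is the Claim_ definition above) =====
theorem format_accounts_py_spec : Claim_equal_format_accounts_py := by
  intro accounts _
  exact format_accounts_py_cases accounts
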